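-- pv_equiv track=rewrite | github.com/MichalPodlaszuk/Edabit_Challenges | Very Hard/Party People Part I.py | party_people
-- ===== SOURCE A (Python) =====
-- def party_people(arr):
--     for i in arr:
--         if i > len(arr):
--             arr.remove(i)
--             return party_people(arr)
--         else:
--             pass
--     return len(arr)
-- ===== SOURCE B (Python) =====
-- def party_people(arr):
--     # Return value only: A mutates arr in place; B leaves it untouched.
--     s = sorted(arr)
--     n = len(s)
--     for L in range(n, 0, -1):
--         if s[L - 1] <= L and (L == n or s[L] > L):
--             return L
--     return 0
-- ===== Notes on version B (the rewrite author's own statement) =====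
-- stated objective: faster
-- what changed: A repeatedly rescans the list, removes the first element exceeding the current length and recurses (return value only: A mutates its argument, B does not); B sorts the list once and scans L from n down to 0, returning the largest L whose sorted boundary (s[L-1] <= L and, if L < n, s[L] > L) certifies that exactly L elements are <= L.
import Mathlib
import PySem

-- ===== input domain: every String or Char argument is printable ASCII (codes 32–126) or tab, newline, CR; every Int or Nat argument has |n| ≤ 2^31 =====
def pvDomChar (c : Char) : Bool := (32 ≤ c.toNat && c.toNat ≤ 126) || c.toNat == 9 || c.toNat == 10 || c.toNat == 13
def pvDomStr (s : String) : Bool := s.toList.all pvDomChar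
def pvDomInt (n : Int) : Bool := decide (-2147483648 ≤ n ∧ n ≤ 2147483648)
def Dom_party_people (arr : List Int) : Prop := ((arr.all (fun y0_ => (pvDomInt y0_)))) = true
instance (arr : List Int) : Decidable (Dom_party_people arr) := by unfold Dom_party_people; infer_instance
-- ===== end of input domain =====

-- B replaces A's quadratic remove-and-recurse simulation by sort + one descending
-- boundary scan (return value only: A mutates its argument in place, B does not).

-- ===== PORT A =====
-- the for-loop returns at the FIRST element i with i > len(arr); arr.remove(i)
-- removes the first occurrence of i (present, so it cannot raise) = List.erase
def party_people (arr : List Int) : Int :=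
  match h : arr.find? (fun i => decide ((arr.length : Int) < i)) with
  | some i => party_people (arr.erase i)
  | none => (arr.length : Int)
termination_by arr.length
decreasing_by
  have hm : i ∈ arr := List.mem_of_find?_eq_some h
  have h1 : 0 < arr.length := List.length_pos_of_mem hm
  have h2 := List.length_erase_of_mem hm
  omega

-- ===== PORT B =====
-- 'for L in range(n, 0, -1)' counting down; s[L-1] and s[L] are always in range
-- (1 ≤ L ≤ n, and s[L] is only read when L ≠ n), so getD with a dummy default is exact
def partyScan (s : List Int) (n : Nat) : Nat → Int
  | 0 => 0
  | L + 1 =>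
      if s.getD L 0 ≤ ((L + 1 : Nat) : Int) ∧
         (L + 1 = n ∨ ((L + 1 : Nat) : Int) < s.getD (L + 1) 0) then
        ((L + 1 : Nat) : Int)
      else partyScan s n L

def party_people_alt (arr : List Int) : Int :=
  let s := PySem.List.sorted arr (fun x => x) false
  partyScan s s.length s.length

-- ===== PRECONDITION & SPEC =====
def Spec_party_people (arr : List Int) (out : Int) : Prop := out = party_people_alt arr
instance (arr : List Int) (out : Int) : Decidable (Spec_party_people arr out) := by unfold Spec_party_people; infer_instance

-- ===== CLAIM (what is proved, stated in full; the proofs are below) =====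
def Claim_equal_party_people : Prop := ∀ (arr : List Int), Dom_party_people arr → Spec_party_people arr (party_people arr)

-- ===== LEMMAS AND PROOFS =====

-- reference scan: same descending search, but tested by counting in the unsorted list
def gref (arr : List Int) : Nat → Int
  | 0 => 0
  | L + 1 =>
      if arr.countP (fun x => decide (x ≤ ((L + 1 : Nat) : Int))) = L + 1 then ((L + 1 : Nat) : Int)
      else gref arr L

-- monotonicity of a pairwise-≤ list by index
theorem sorted_mono (s : List Int) (hs : s.Pairwise (· ≤ ·)) (i j : Nat)
    (hj : j < s.length) (hij : i ≤ j) : s[i]'(by omega) ≤ s[j] := by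
  rcases Nat.lt_or_ge i j with h | h
  · exact (List.pairwise_iff_getElem.mp hs) i j (by omega) hj h
  · have : i = j := by omega
    subst this; exact le_refl _

-- count equation ⟺ the first L elements are ≤ v and the rest are > v
theorem cnt_pref (s : List Int) (hs : s.Pairwise (· ≤ ·)) (v : Int) (L : Nat)
    (hL : L ≤ s.length) :
    (s.countP (fun x => decide (x ≤ v)) = L) ↔
      ((∀ x ∈ s.take L, x ≤ v) ∧ (∀ x ∈ s.drop L, v < x)) := by
  induction s generalizing L with
  | nil =>
      simp at hL; subst hL; simp
  | cons a t ih =>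
      rcases List.pairwise_cons.mp hs with ⟨ha, ht⟩
      cases L with
      | zero =>
          simp only [List.take_zero, List.drop_zero]
          constructor
          · intro h0
            have hva : ¬ (a ≤ v) := by
              intro hav
              have : (a :: t).countP (fun x => decide (x ≤ v)) =
                  t.countP (fun x => decide (x ≤ v)) + 1 := by
                simp [hav]
              omega
            refine ⟨by simp, ?_⟩
            intro x hx
            rcases List.mem_cons.mp hx with rfl | hxt
            · omega
            · exact lt_of_lt_of_le (by omega) (ha x hxt)
          · rintro ⟨_, h⟩
            apply List.countP_eq_zero.mpr
            intro x hx
            simp only [decide_eq_true_eq]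
            have := h x hx
            omega
      | succ L' =>
          by_cases hav : a ≤ v
          · have hcnt : (a :: t).countP (fun x => decide (x ≤ v)) =
                t.countP (fun x => decide (x ≤ v)) + 1 := by
              simp [hav]
            rw [hcnt, List.take_succ_cons, List.drop_succ_cons]
            constructor
            · intro h
              have h' : t.countP (fun x => decide (x ≤ v)) = L' := by omega
              rcases (ih ht L' (by simpa using hL)).mp h' with ⟨h1, h2⟩
              refine ⟨?_, h2⟩
              intro x hx
              rcases List.mem_cons.mp hx with rfl | hxt
              · exact hav
              · exact h1 x hxt
            · rintro ⟨h1, h2⟩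
              have h' := (ih ht L' (by simpa using hL)).mpr
                ⟨fun x hx => h1 x (List.mem_cons_of_mem _ hx), h2⟩
              omega
          · have hcnt : (a :: t).countP (fun x => decide (x ≤ v)) = 0 := by
              apply List.countP_eq_zero.mpr
              intro x hx
              simp only [decide_eq_true_eq]
              rcases List.mem_cons.mp hx with rfl | hxt
              · exact hav
              · intro hxv; exact hav (le_trans (ha x hxt) hxv)
            rw [hcnt, List.take_succ_cons]
            constructor
            · intro h; omega
            · rintro ⟨h1, _⟩
              exact absurd (h1 a (by simp)) hav

-- boundary test on a sorted list ⟺ count equation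
theorem cnt_sorted_eq_iff (s : List Int) (hs : s.Pairwise (· ≤ ·)) (v : Int) (L : Nat)
    (hL1 : 1 ≤ L) (hL : L ≤ s.length) :
    (s.countP (fun x => decide (x ≤ v)) = L) ↔
      (s.getD (L - 1) 0 ≤ v ∧ (L = s.length ∨ v < s.getD L 0)) := by
  rw [cnt_pref s hs v L hL]
  have hL1' : L - 1 < s.length := by omega
  rw [List.getD_eq_getElem s 0 hL1']
  constructor
  · rintro ⟨h1, h2⟩
    refine ⟨?_, ?_⟩
    · have hmem : s[L-1] ∈ s.take L := by
        have h' : (s.take L)[L-1]'(by simp; omega) = s[L-1] := List.getElem_take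
        rw [← h']; exact List.getElem_mem _
      exact h1 _ hmem
    · rcases Nat.lt_or_ge L s.length with h | h
      · right
        rw [List.getD_eq_getElem s 0 h]
        have hmem : s[L] ∈ s.drop L := by
          have h' : (s.drop L)[0]'(by simp; omega) = s[L] := by simp
          rw [← h']; exact List.getElem_mem _
        exact h2 _ hmem
      · left; omega
  · rintro ⟨h1, h2⟩
    constructor
    · intro x hx
      rcases List.mem_iff_getElem.mp hx with ⟨j, hj, rfl⟩
      have hjL : j < L := by simp at hj; omega
      rw [List.getElem_take]
      exact le_trans (sorted_mono s hs j (L-1) hL1' (by omega)) h1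
    · intro x hx
      have hLlen : L < s.length := by
        by_contra hcon
        rw [List.drop_eq_nil_of_le (by omega)] at hx
        simp at hx
      rcases List.mem_iff_getElem.mp hx with ⟨k, hk, rfl⟩
      have hkd : k < s.length - L := by simpa using hk
      have h2' : v < s[L] := by
        rcases h2 with h2 | h2
        · omega
        · rwa [List.getD_eq_getElem s 0 hLlen] at h2
      have h' : (s.drop L)[k]'hk = s[L+k]'(by omega) := by simp
      rw [h']
      exact lt_of_lt_of_le h2' (sorted_mono s hs L (L+k) (by omega) (by omega))

theorem partyScan_eq_gref (arr : List Int) (K : Nat)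
    (hK : K ≤ arr.length) :
    partyScan (PySem.List.sorted arr (fun x => x) false)
      (PySem.List.sorted arr (fun x => x) false).length K = gref arr K := by
  induction K with
  | zero => rfl
  | succ K ih =>
      have hs : (PySem.List.sorted arr (fun x => x) false).Pairwise (· ≤ ·) := by
        simpa using PySem.List.sorted_pairwise (xs := arr) (key := fun x => x)
      have hlen : (PySem.List.sorted arr (fun x => x) false).length = arr.length := by
        simpa using PySem.List.length_sorted (xs := arr) (key := fun x => x) (rev := false)
      have hcnt : arr.countP (fun x => decide (x ≤ ((K+1:Nat):Int))) =
          (PySem.List.sorted arr (fun x => x) false).countP (fun x => decide (x ≤ ((K+1:Nat):Int))) :=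
        ((PySem.List.sorted_perm (xs := arr) (key := fun x => x) (rev := false)).countP_eq _).symm
      have hiff := cnt_sorted_eq_iff (PySem.List.sorted arr (fun x => x) false) hs
        ((K+1:Nat):Int) (K+1) (by omega) (by omega)
      rw [partyScan, gref, hcnt]
      by_cases hc : (PySem.List.sorted arr (fun x => x) false).getD K 0 ≤ ((K+1:Nat):Int) ∧
          (K+1 = (PySem.List.sorted arr (fun x => x) false).length ∨
            ((K+1:Nat):Int) < (PySem.List.sorted arr (fun x => x) false).getD (K+1) 0)
      · rw [if_pos hc, if_pos (hiff.mpr hc)]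
      · rw [if_neg hc, if_neg (fun hcc => hc (hiff.mp hcc)), ih (by omega)]

theorem alt_eq_gref (arr : List Int) :
    party_people_alt arr = gref arr arr.length := by
  have hlen : (PySem.List.sorted arr (fun x => x) false).length = arr.length := by
    simpa using PySem.List.length_sorted (xs := arr) (key := fun x => x) (rev := false)
  unfold party_people_alt
  exact (partyScan_eq_gref arr _ (le_of_eq hlen)).trans (by rw [hlen])

-- removing one element i with i > len(arr) does not change gref below the top level
theorem gref_erase_le (arr : List Int) (i : Int) (hmem : i ∈ arr)
    (hi : (arr.length : Int) < i) :
    ∀ L : Nat, L + 1 ≤ arr.length → gref arr L = gref (arr.erase i) L := by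
  intro L
  induction L with
  | zero => intro _; rfl
  | succ L ih =>
      intro hL
      have hperm : arr.Perm (i :: arr.erase i) := List.perm_cons_erase hmem
      have hni : ¬ (i ≤ ((L+1:Nat):Int)) := by
        have h1 : ((L+1:Nat):Int) < (arr.length : Int) := by exact_mod_cast hL
        omega
      have hcnt : arr.countP (fun x => decide (x ≤ ((L+1:Nat):Int))) =
          (arr.erase i).countP (fun x => decide (x ≤ ((L+1:Nat):Int))) := by
        rw [hperm.countP_eq]
        simp [List.countP_cons]
        push_cast at hni
        omega
      rw [gref, gref, hcnt, ih (by omega)]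

-- the top level itself is skipped, because the element i > len(arr) breaks the count
theorem gref_top (arr : List Int) (i : Int) (hmem : i ∈ arr)
    (hi : (arr.length : Int) < i) :
    gref arr arr.length = gref arr (arr.length - 1) := by
  have hpos : 0 < arr.length := List.length_pos_of_mem hmem
  obtain ⟨n, hn⟩ : ∃ n, arr.length = n + 1 := ⟨arr.length - 1, by omega⟩
  have hne : arr.countP (fun x => decide (x ≤ ((n+1:Nat):Int))) ≠ n+1 := by
    intro hc
    have hall : ∀ x ∈ arr, decide (x ≤ ((n+1:Nat):Int)) = true :=
      List.countP_eq_length.mp (by rw [hc, hn])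
    have := hall i hmem
    simp only [decide_eq_true_eq] at this
    rw [hn] at hi
    push_cast at hi this
    omega
  rw [hn]
  rw [show n + 1 - 1 = n from rfl]
  rw [gref, if_neg hne]

-- when every element is ≤ len(arr), gref returns len(arr)
theorem gref_all (arr : List Int) (hall : ∀ x ∈ arr, x ≤ (arr.length : Int)) :
    gref arr arr.length = (arr.length : Int) := by
  cases hlen : arr.length with
  | zero => simp [gref]
  | succ m =>
      have hc : arr.countP (fun x => decide (x ≤ ((m+1:Nat):Int))) = m+1 := by
        rw [← hlen]
        apply List.countP_eq_length.mpr
        intro x hx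
        simp only [decide_eq_true_eq]
        have := hall x hx
        omega
      rw [gref, if_pos hc]

theorem a_eq_gref (arr : List Int) :
    party_people arr = gref arr arr.length := by
  induction arr using party_people.induct with
  | case1 arr i h ih =>
      have hmem : i ∈ arr := List.mem_of_find?_eq_some h
      have hi : (arr.length : Int) < i := by
        have := List.find?_some h
        simp at this
        exact this
      have hpos : 0 < arr.length := List.length_pos_of_mem hmem
      have hlen : (arr.erase i).length = arr.length - 1 := List.length_erase_of_mem hmem
      rw [party_people]
      split
      next j hj =>
        rw [h] at hj
        injection hj with hji
        subst hji
        rw [ih, hlen, ← gref_erase_le arr i hmem hi (arr.length - 1) (by omega),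
          ← gref_top arr i hmem hi]
      next hj => rw [h] at hj; cases hj
  | case2 arr h =>
      rw [party_people]
      split
      next j hj => rw [h] at hj; cases hj
      next _ =>
        refine (gref_all arr ?_).symm
        intro x hx
        have := List.find?_eq_none.mp h x hx
        simp at this
        exact this

-- ===== VERDICT (by name: the statement is the Claim_ definition above) =====
theorem party_people_spec : Claim_equal_party_people := by
  intro arr _
  unfold Spec_party_people
  rw [a_eq_gref, alt_eq_gref]
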